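-- pv_equiv track=rewrite | github.com/ramyasingh3/todo | DSA/2025_06_05/selection_sort.py | selection_sort_with_comparison_count
-- ===== SOURCE A (Python) =====
-- def selection_sort_with_comparison_count(arr):
--     """Selection sort with comparison and swap counting"""
--     n = len(arr)
--     comparisons = 0
--     swaps = 0
--
--     for i in range(n):
--         min_idx = i
--         for j in range(i + 1, n):
--             comparisons += 1
--             if arr[j] < arr[min_idx]:
--                 min_idx = j
--
--         if min_idx != i:
--             arr[i], arr[min_idx] = arr[min_idx], arr[i]
--             swaps += 1
--
--     return arr, comparisons, swaps
-- ===== SOURCE B (Python) =====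
-- def selection_sort_with_comparison_count(arr):
--     """Sort-then-place: sort once; swap each needed value into place via index lookup"""
--     n = len(arr)
--     comparisons = n * (n - 1) // 2
--     swaps = 0
--     target = sorted(arr)
--     for i in range(n):
--         if arr[i] != target[i]:
--             m = arr.index(target[i], i)
--             arr[i], arr[m] = arr[m], arr[i]
--             swaps += 1
--     return arr, comparisons, swaps
-- ===== Notes on version B (the rewrite author's own statement) =====
-- stated objective: faster
-- what changed: B never scans for a minimum: it sorts the list once to obtain the target order, then for each position swaps in the required value located by a first-occurrence lookup (arr.index(target[i], i)), with the comparison count given by the closed form n*(n-1)//2; this is exactly selection sort's result because the first occurrence of min(arr[i:]) is selection sort's strict-< argmin.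
import Mathlib
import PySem

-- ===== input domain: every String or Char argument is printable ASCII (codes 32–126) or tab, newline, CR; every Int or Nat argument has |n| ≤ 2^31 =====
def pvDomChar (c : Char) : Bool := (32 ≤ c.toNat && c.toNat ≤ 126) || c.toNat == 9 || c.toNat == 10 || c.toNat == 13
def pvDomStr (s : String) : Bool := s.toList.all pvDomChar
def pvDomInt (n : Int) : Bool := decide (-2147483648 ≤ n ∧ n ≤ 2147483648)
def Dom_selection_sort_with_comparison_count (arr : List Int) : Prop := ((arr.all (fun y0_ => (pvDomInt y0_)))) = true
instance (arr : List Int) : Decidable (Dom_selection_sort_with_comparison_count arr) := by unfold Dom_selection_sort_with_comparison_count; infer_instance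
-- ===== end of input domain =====

-- B replaces A's repeated minimum scans by "sort once, then place": it sorts the list,
-- then swaps each target value into position via a first-occurrence index lookup, with the
-- comparison count as the closed form n*(n-1)//2; same return value, different algorithm.
-- (A mutates its argument in place in Python; the equivalence proved here is about the return value.)


-- ===== PORT A =====
-- one outer-loop iteration of A: inner comparison loop tracking (comparisons, min_idx), then conditional swap
def pvStepA (n : Int) (st : List Int × Int × Int) (i : Int) : List Int × Int × Int :=
  let a := st.1
  let r := (PySem.List.pyRange (i + 1) n 1).foldl
    (fun (p : Int × Int) j =>
      (p.1 + 1, if PySem.List.pyGetD a j 0 < PySem.List.pyGetD a p.2 0 then j else p.2))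
    (st.2.1, i)
  let min_idx := r.2
  if min_idx ≠ i then
    (PySem.List.pySetD (PySem.List.pySetD a i (PySem.List.pyGetD a min_idx 0)) min_idx
       (PySem.List.pyGetD a i 0), r.1, st.2.2 + 1)
  else (a, r.1, st.2.2)

def selection_sort_with_comparison_count (arr : List Int) : List Int × Int × Int :=
  let n : Int := (arr.length : Int)
  (PySem.List.pyRange 0 n 1).foldl (pvStepA n) (arr, 0, 0)

-- ===== PORT B =====
-- one outer-loop iteration of B: if arr[i] != target[i], swap in the value found by
-- arr.index(target[i], i); the lookup is ported as i + first index in arr[i:] (exact: the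
-- value is always present there, so Python's ValueError is unreachable and the default unused)
def pvStepB (target : List Int) (st : List Int × Int) (i : Int) : List Int × Int :=
  let a := st.1
  if PySem.List.pyGetD a i 0 ≠ PySem.List.pyGetD target i 0 then
    let m : Int := i + (((PySem.List.index? (a.drop i.toNat) (PySem.List.pyGetD target i 0)).getD 0 : Nat) : Int)
    (PySem.List.pySetD (PySem.List.pySetD a i (PySem.List.pyGetD a m 0)) m
       (PySem.List.pyGetD a i 0), st.2 + 1)
  else (a, st.2)

def selection_sort_with_comparison_count_alt (arr : List Int) : List Int × Int × Int :=
  let n : Int := (arr.length : Int)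
  let comparisons : Int := PySem.Int.floordiv (n * (n - 1)) 2
  let target := PySem.List.sorted arr id false
  let r := (PySem.List.pyRange 0 n 1).foldl (pvStepB target) (arr, 0)
  (r.1, comparisons, r.2)

-- ===== PRECONDITION & SPEC =====
def Spec_selection_sort_with_comparison_count (arr : List Int) (out : List Int × Int × Int) : Prop := out = selection_sort_with_comparison_count_alt arr
instance (arr : List Int) (out : List Int × Int × Int) : Decidable (Spec_selection_sort_with_comparison_count arr out) := by unfold Spec_selection_sort_with_comparison_count; infer_instance

-- ===== CLAIM (what is proved, stated in full; the proofs are below) =====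
def Claim_equal_selection_sort_with_comparison_count : Prop := ∀ (arr : List Int), Dom_selection_sort_with_comparison_count arr → Spec_selection_sort_with_comparison_count arr (selection_sort_with_comparison_count arr)

-- ===== LEMMAS AND PROOFS =====

-- A's inner fold = (counter advanced by the list length, first-argmin fold)
lemma inner_split (key : Int → Int) (l : List Int) : ∀ (c m : Int),
    l.foldl (fun (p : Int × Int) j => (p.1 + 1, if key j < key p.2 then j else p.2)) (c, m)
    = (c + l.length, l.foldl (fun m j => if key j < key m then j else m) m) := by
  induction l with
  | nil => intro c m; simp
  | cons x t ih =>
      intro c m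
      simp only [List.foldl_cons, ih, List.length_cons, Prod.mk.injEq]
      exact ⟨by push_cast; ring, trivial⟩

-- if the current minimum is already ≤ everything in the remaining suffix, the argmin fold keeps it
lemma argmin_stay (a : List Int) : ∀ (fuel : Nat) (s : Int), ((a.length : Int) - s).toNat = fuel → 0 ≤ s →
    ∀ (m : Int), 0 ≤ m → m < (a.length : Int) →
    (∀ x ∈ a.drop s.toNat, PySem.List.pyGetD a m 0 ≤ x) →
    (PySem.List.pyRange s (a.length : Int) 1).foldl
      (fun m j => if PySem.List.pyGetD a j 0 < PySem.List.pyGetD a m 0 then j else m) m = m := by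
  intro fuel
  induction fuel with
  | zero =>
      intro s hf h0 m _ _ _
      rw [PySem.List.pyRange_one_eq_nil (by omega)]
      rfl
  | succ f ih =>
      intro s hf h0 m hm0 hmlt hbnd
      have hs : s < (a.length : Int) := by omega
      rw [PySem.List.pyRange_one_cons hs, List.foldl_cons]
      have hsn : s.toNat < a.length := by omega
      have hhead : PySem.List.pyGetD a s 0 = a[s.toNat] := by
        exact PySem.List.pyGetD_eq_getElem a 0 h0 (by omega)
      have hmem : a[s.toNat] ∈ a.drop s.toNat := by
        rw [← List.getElem_cons_drop hsn]; exact List.mem_cons_self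
      have hge : ¬ (PySem.List.pyGetD a s 0 < PySem.List.pyGetD a m 0) := by
        rw [hhead]; exact not_lt.mpr (hbnd _ hmem)
      rw [if_neg hge]
      refine ih (s + 1) (by omega) (by omega) m hm0 hmlt ?_
      intro x hx
      refine hbnd x ?_
      have : a.drop (s + 1).toNat = (a.drop s.toNat).drop 1 := by
        rw [List.drop_drop]; congr 1; omega
      rw [this] at hx
      exact List.drop_subset _ _ hx
-- if v is a strict improvement over the current minimum and v is the least value of the suffix,
-- the argmin fold returns the first position of v in the suffix
lemma argmin_find (a : List Int) (v : Int) : ∀ (fuel : Nat) (s : Int), ((a.length : Int) - s).toNat = fuel → 0 ≤ s →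
    ∀ (m : Int), 0 ≤ m → m < (a.length : Int) →
    v ∈ a.drop s.toNat → (∀ x ∈ a.drop s.toNat, v ≤ x) → v < PySem.List.pyGetD a m 0 →
    (PySem.List.pyRange s (a.length : Int) 1).foldl
      (fun m j => if PySem.List.pyGetD a j 0 < PySem.List.pyGetD a m 0 then j else m) m
    = s + (((PySem.List.index? (a.drop s.toNat) v).getD 0 : Nat) : Int) := by
  intro fuel
  induction fuel with
  | zero =>
      intro s hf h0 m _ _ hv _ _
      have : a.drop s.toNat = [] := List.drop_eq_nil_of_le (by omega)
      rw [this] at hv; cases hv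
  | succ f ih =>
      intro s hf h0 m hm0 hmlt hv hbnd hlt
      have hsn : s.toNat < a.length := by
        by_contra h
        rw [List.drop_eq_nil_of_le (by omega)] at hv; cases hv
      have hs : s < (a.length : Int) := by omega
      rw [PySem.List.pyRange_one_cons hs, List.foldl_cons]
      have hcons : a.drop s.toNat = a[s.toNat] :: a.drop (s.toNat + 1) := (List.getElem_cons_drop hsn).symm
      have hhead : PySem.List.pyGetD a s 0 = a[s.toNat] := by
        exact PySem.List.pyGetD_eq_getElem a 0 h0 (by omega)
      have hdrop1 : a.drop (s + 1).toNat = a.drop (s.toNat + 1) := by congr 1; omega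
      by_cases hveq : a[s.toNat] = v
      · -- head is the (first) minimum: acc becomes s and then never changes
        have hupd : PySem.List.pyGetD a s 0 < PySem.List.pyGetD a m 0 := by rw [hhead, hveq]; exact hlt
        rw [if_pos hupd]
        have hstay : (PySem.List.pyRange (s + 1) (a.length : Int) 1).foldl
            (fun m j => if PySem.List.pyGetD a j 0 < PySem.List.pyGetD a m 0 then j else m) s = s := by
          refine argmin_stay a ((a.length : Int) - (s+1)).toNat (s+1) rfl (by omega) s h0 hs ?_
          intro x hx
          rw [hhead, hveq]
          refine hbnd x ?_
          rw [hdrop1] at hx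
          rw [hcons]; exact List.mem_cons_of_mem _ hx
        rw [hstay]
        have : PySem.List.index? (a.drop s.toNat) v = some 0 := by
          rw [hcons, hveq]; exact PySem.List.index?_cons_self _ _
        rw [this]; simp
      · -- head is not v: v sits strictly later; recurse
        have hvtail : v ∈ a.drop (s.toNat + 1) := by
          rw [hcons] at hv
          rcases List.mem_cons.mp hv with h | h
          · exact absurd h.symm hveq
          · exact h
        have hbtail : ∀ x ∈ a.drop (s + 1).toNat, v ≤ x := by
          intro x hx
          rw [hdrop1] at hx
          exact hbnd x (by rw [hcons]; exact List.mem_cons_of_mem _ hx)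
        obtain ⟨k, hk⟩ : ∃ k, PySem.List.index? (a.drop (s.toNat + 1)) v = some k := by
          cases hk0 : PySem.List.index? (a.drop (s.toNat + 1)) v with
          | none => exact absurd hvtail ((PySem.List.index?_eq_none_iff _ _).mp hk0)
          | some k => exact ⟨k, rfl⟩
        have hidx : PySem.List.index? (a.drop s.toNat) v = some (k + 1) := by
          rw [hcons, PySem.List.index?_cons_of_ne _ hveq, hk]; rfl
        have hvlt_head : v < a[s.toNat] := by
          have := hbnd _ (by rw [hcons]; exact List.mem_cons_self)
          omega
        have hrec : ∀ (m' : Int), 0 ≤ m' → m' < (a.length : Int) → v < PySem.List.pyGetD a m' 0 →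
            (PySem.List.pyRange (s + 1) (a.length : Int) 1).foldl
              (fun m j => if PySem.List.pyGetD a j 0 < PySem.List.pyGetD a m 0 then j else m) m'
            = s + ((k : Nat) : Int) + 1 := by
          intro m' h1 h2 h3
          have := ih (s + 1) (by omega) (by omega) m' h1 h2 (by rw [hdrop1]; exact hvtail) hbtail h3
          rw [this, hdrop1, hk]
          simp only [Option.getD_some]
          ring
        rw [hidx]
        by_cases hupd : PySem.List.pyGetD a s 0 < PySem.List.pyGetD a m 0
        · rw [if_pos hupd]
          rw [hrec s h0 hs (by rw [hhead]; exact hvlt_head)]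
          simp only [Option.getD_some]; push_cast; ring
        · rw [if_neg hupd]
          rw [hrec m hm0 hmlt hlt]
          simp only [Option.getD_some]; push_cast; ring

-- swapping two entries is a permutation
lemma swap_perm (a : List Int) (i r : Nat) (hi : i < a.length) (hr : r < a.length) :
    ((a.set i (a[r]'hr)).set r (a[i]'hi)).Perm a := by
  rw [List.perm_iff_count]
  intro x
  rw [List.count_set (by simpa using hr), List.count_set hi]
  have hgr : (a.set i (a[r]'hr))[r]'(by simpa using hr) = a[r]'hr := by
    by_cases h : i = r
    · subst h; exact List.getElem_set_self _
    · exact List.getElem_set_ne h _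
  rw [hgr]
  have h1 : (a[i]'hi == x) = true → 0 < a.count x := by
    intro h; rw [beq_iff_eq] at h; subst h; exact List.count_pos_iff.mpr (List.getElem_mem hi)
  by_cases p : (a[i]'hi == x) = true
  · have := h1 p
    by_cases q : (a[r]'hr == x) = true <;> simp [p, q] <;> try omega
  · by_cases q : (a[r]'hr == x) = true <;> simp [p, q]

-- setting at an index ≥ n does not change the first n elements
lemma take_set_of_le (l : List Int) (n m : Nat) (v : Int) (h : n ≤ m) :
    (l.set m v).take n = l.take n := by
  apply List.ext_getElem (by simp)
  intro k hk1 hk2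
  simp only [List.getElem_take, List.getElem_set]
  rw [if_neg (by simp at hk1; omega)]

-- under the loop invariant, target[i] is the least value of a[i:] and occurs in it
lemma target_min (arr a : List Int) (i : Nat)
    (hperm : a.Perm arr)
    (hpre : a.take i = (PySem.List.sorted arr id false).take i)
    (hi : i < arr.length) :
    ((PySem.List.sorted arr id false)[i]'(by rw [PySem.List.length_sorted]; exact hi) ∈ a.drop i)
    ∧ (∀ x ∈ a.drop i, (PySem.List.sorted arr id false)[i]'(by rw [PySem.List.length_sorted]; exact hi) ≤ x) := by
  set target := PySem.List.sorted arr id false with hT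
  have hTlen : target.length = arr.length := by rw [hT]; exact PySem.List.length_sorted arr id false
  have hTi : i < target.length := by omega
  have hpermT : a.Perm target := hperm.trans (PySem.List.sorted_perm arr id false).symm
  have hdropPerm : (a.drop i).Perm (target.drop i) := by
    have hh := hpermT
    rw [← List.take_append_drop i a, ← List.take_append_drop i target, hpre] at hh
    exact (List.perm_append_left_iff _).mp hh
  have hpw : (target.drop i).Pairwise (fun x y => x ≤ y) := by
    have hp := PySem.List.sorted_pairwise arr id
    rw [← hT] at hp
    simpa [id] using hp.sublist (List.drop_sublist _ _)
  have hconsT : target.drop i = target[i] :: target.drop (i + 1) := (List.getElem_cons_drop hTi).symm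
  have hminT : ∀ x ∈ target.drop i, target[i] ≤ x := by
    intro x hx
    rw [hconsT] at hx
    rcases List.mem_cons.mp hx with h | h
    · omega
    · rw [hconsT] at hpw
      exact (List.pairwise_cons.mp hpw).1 x h
  constructor
  · rw [hdropPerm.mem_iff, hconsT]; exact List.mem_cons_self
  · intro x hx
    exact hminT x (hdropPerm.mem_iff.mp hx)

-- triangular-number step
lemma tri_succ (m : Nat) : (m + 1) * m / 2 = m + m * (m - 1) / 2 := by
  cases m with
  | zero => rfl
  | succ t =>
      have h : (t + 1 + 1) * (t + 1) = (t + 1) * t + (t + 1) * 2 := by ring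
      rw [h, Nat.add_mul_div_right _ _ (by norm_num : 0 < 2)]
      simp [Nat.add_comm]

lemma floordiv_tri (L : Nat) :
    PySem.Int.floordiv ((L : Int) * ((L : Int) - 1)) 2 = ((L * (L - 1) / 2 : Nat) : Int) := by
  cases L with
  | zero => simp [PySem.Int.floordiv]
  | succ t =>
      have h : ((t + 1 : Nat) : Int) * (((t + 1 : Nat) : Int) - 1) = (((t + 1) * t : Nat) : Int) := by
        push_cast; ring
      rw [h]
      rw [show (2 : Int) = ((2 : Nat) : Int) from rfl]
      rw [PySem.Int.floordiv_natCast]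
      simp

-- main invariant: with a ~ arr and a's first i entries already in sorted order, A's remaining
-- loop equals B's remaining loop (same array, same swap count), the comparison counter advancing
-- by the triangular number of the remaining length
lemma outer_loop (arr : List Int) : ∀ (fuel : Nat) (i : Int),
    (((arr.length : Int)) - i).toNat = fuel → 0 ≤ i →
    ∀ (a : List Int) (c s : Int), a.length = arr.length → a.Perm arr →
    a.take i.toNat = (PySem.List.sorted arr id false).take i.toNat →
    (PySem.List.pyRange i (arr.length : Int) 1).foldl (pvStepA (arr.length : Int)) (a, c, s)
    = (((PySem.List.pyRange i (arr.length : Int) 1).foldl (pvStepB (PySem.List.sorted arr id false)) (a, s)).1,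
       c + (((((arr.length : Int)) - i).toNat * ((((arr.length : Int)) - i).toNat - 1) / 2 : Nat) : Int),
       ((PySem.List.pyRange i (arr.length : Int) 1).foldl (pvStepB (PySem.List.sorted arr id false)) (a, s)).2) := by
  intro fuel
  induction fuel with
  | zero =>
      intro i hf h0 a c s _ _ _
      rw [PySem.List.pyRange_one_eq_nil (by omega)]
      simp [hf]
  | succ f ih =>
      intro i hf h0 a c s hlen hperm hpre
      have hlt : i < (arr.length : Int) := by omega
      have hiN : i.toNat < arr.length := by omega
      have hiA : i.toNat < a.length := by omega
      set T := PySem.List.sorted arr id false with hT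
      have hTlen : T.length = arr.length := by rw [hT]; exact PySem.List.length_sorted arr id false
      obtain ⟨hvmem, hvbnd⟩ := target_min arr a i.toNat hperm hpre hiN
      simp only [← hT] at hvmem hvbnd
      have hagetD : PySem.List.pyGetD a i 0 = a[i.toNat] := PySem.List.pyGetD_eq_getElem a 0 h0 (by omega)
      have hTgetD : PySem.List.pyGetD T i 0 = T[i.toNat]'(by omega) := PySem.List.pyGetD_eq_getElem T 0 h0 (by omega)
      have hnl : (arr.length : Int) = (a.length : Int) := by rw [hlen]
      have hconsA : a.drop i.toNat = a[i.toNat] :: a.drop (i.toNat + 1) := (List.getElem_cons_drop hiA).symm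
      have hdrop1 : a.drop (i + 1).toNat = a.drop (i.toNat + 1) := by congr 1; omega
      have hcnt : ((PySem.List.pyRange (i + 1) (arr.length : Int) 1).length : Int)
          = (((arr.length : Int) - (i + 1)).toNat : Int) := by
        rw [PySem.List.length_pyRange_one]
      rw [PySem.List.pyRange_one_cons hlt]
      simp only [List.foldl_cons]
      by_cases heq : a[i.toNat] = T[i.toNat]'(by omega)
      · -- arr[i] == target[i]: neither side swaps
        have hAM : (PySem.List.pyRange (i + 1) (arr.length : Int) 1).foldl
            (fun m j => if PySem.List.pyGetD a j 0 < PySem.List.pyGetD a m 0 then j else m) i = i := by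
          rw [hnl]
          refine argmin_stay a ((a.length : Int) - (i + 1)).toNat (i + 1) rfl (by omega) i h0 (by omega) ?_
          intro x hx
          rw [hagetD, heq]
          exact hvbnd x (by rw [hconsA]; exact List.mem_cons_of_mem _ (hdrop1 ▸ hx))
        have hstepA : pvStepA (arr.length : Int) (a, c, s) i
            = (a, c + (((arr.length : Int) - (i + 1)).toNat : Int), s) := by
          simp only [pvStepA, inner_split (fun t => PySem.List.pyGetD a t 0), hAM, hcnt]
          simp
        have hstepB : pvStepB T (a, s) i = (a, s) := by
          simp only [pvStepB, hagetD, hTgetD]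
          rw [if_neg (by simp [heq])]
        have hpre' : a.take (i + 1).toNat = T.take (i + 1).toNat := by
          have h1 : (i + 1).toNat = i.toNat + 1 := by omega
          rw [h1, List.take_add_one, List.take_add_one, hpre,
            List.getElem?_eq_getElem hiA, List.getElem?_eq_getElem (by omega)]
          simp [heq]
        rw [hstepA, hstepB, ih (i + 1) (by omega) (by omega) a _ s hlen hperm hpre']
        simp only [Prod.mk.injEq]
        refine ⟨trivial, ?_, trivial⟩
        have hk1 : ((arr.length : Int) - i).toNat = ((arr.length : Int) - (i + 1)).toNat + 1 := by omega
        rw [hk1]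
        simp only [Nat.add_sub_cancel]
        rw [tri_succ]
        push_cast
        ring
      · -- arr[i] != target[i]: both sides swap in the first occurrence of target[i]
        have hvlt : T[i.toNat]'(by omega) < a[i.toNat] := by
          have h1 := hvbnd a[i.toNat] (by rw [hconsA]; exact List.mem_cons_self)
          omega
        have hvtail : T[i.toNat]'(by omega) ∈ a.drop (i.toNat + 1) := by
          rw [hconsA] at hvmem
          rcases List.mem_cons.mp hvmem with h | h
          · exact absurd h.symm heq
          · exact h
        obtain ⟨k, hk⟩ : ∃ k, PySem.List.index? (a.drop (i.toNat + 1)) (T[i.toNat]'(by omega)) = some k := by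
          cases hk0 : PySem.List.index? (a.drop (i.toNat + 1)) (T[i.toNat]'(by omega)) with
          | none => exact absurd hvtail ((PySem.List.index?_eq_none_iff _ _).mp hk0)
          | some k => exact ⟨k, rfl⟩
        obtain ⟨hklt, hkval, -⟩ := PySem.List.getElem_of_index?_eq_some hk
        have hklen : k < a.length - (i.toNat + 1) := by simpa using hklt
        have hrval : a[i.toNat + 1 + k]'(by omega) = T[i.toNat]'(by omega) := by
          rw [← hkval]
          exact List.getElem_drop.symm
        have hidx : PySem.List.index? (a.drop i.toNat) (T[i.toNat]'(by omega)) = some (k + 1) := by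
          rw [hconsA, PySem.List.index?_cons_of_ne _ heq, hk]; rfl
        have hAM : (PySem.List.pyRange (i + 1) (arr.length : Int) 1).foldl
            (fun m j => if PySem.List.pyGetD a j 0 < PySem.List.pyGetD a m 0 then j else m) i
            = i + ((k : Nat) : Int) + 1 := by
          rw [hnl]
          rw [argmin_find a (T[i.toNat]'(by omega)) ((a.length : Int) - (i + 1)).toNat (i + 1) rfl
            (by omega) i h0 (by omega) (by rw [hdrop1]; exact hvtail)
            (by intro x hx; rw [hdrop1] at hx
                exact hvbnd x (by rw [hconsA]; exact List.mem_cons_of_mem _ hx))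
            (by rw [hagetD]; exact hvlt)]
          rw [hdrop1, hk]
          simp only [Option.getD_some]
          ring
        have hstepA : pvStepA (arr.length : Int) (a, c, s) i
            = (PySem.List.pySetD (PySem.List.pySetD a i (PySem.List.pyGetD a (i + ((k : Nat) : Int) + 1) 0))
                 (i + ((k : Nat) : Int) + 1) (PySem.List.pyGetD a i 0),
               c + (((arr.length : Int) - (i + 1)).toNat : Int), s + 1) := by
          simp only [pvStepA, inner_split (fun t => PySem.List.pyGetD a t 0), hAM, hcnt]
          rw [if_pos (by omega)]
        have hstepB : pvStepB T (a, s) i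
            = (PySem.List.pySetD (PySem.List.pySetD a i (PySem.List.pyGetD a (i + ((k : Nat) : Int) + 1) 0))
                 (i + ((k : Nat) : Int) + 1) (PySem.List.pyGetD a i 0), s + 1) := by
          simp only [pvStepB, hTgetD, hidx]
          rw [if_pos (by rw [hagetD]; omega)]
          have hm : i + (((k + 1 : Nat) : Nat) : Int) = i + ((k : Nat) : Int) + 1 := by push_cast; ring
          simp only [Option.getD_some, hm]
        set M : Int := i + ((k : Nat) : Int) + 1 with hM
        have hMtoNat : M.toNat = i.toNat + 1 + k := by omega
        have hMlt : M.toNat < a.length := by omega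
        have hgetM : PySem.List.pyGetD a M 0 = a[i.toNat + 1 + k]'(by omega) := by
          rw [PySem.List.pyGetD_eq_getElem a 0 (by omega) (by omega)]
          congr 1
        have ha' : PySem.List.pySetD (PySem.List.pySetD a i (PySem.List.pyGetD a M 0)) M (PySem.List.pyGetD a i 0)
            = (a.set i.toNat (a[M.toNat]'hMlt)).set M.toNat (a[i.toNat]'hiA) := by
          rw [PySem.List.pySetD_of_nonneg _ _ (show (0 : Int) ≤ M by omega),
            PySem.List.pySetD_of_nonneg _ _ h0, hagetD]
          congr 2
          rw [hgetM]
          congr 1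
          omega
        have hlen' : ((a.set i.toNat (a[M.toNat]'hMlt)).set M.toNat (a[i.toNat]'hiA)).length = arr.length := by
          simp [hlen]
        have hperm' : ((a.set i.toNat (a[M.toNat]'hMlt)).set M.toNat (a[i.toNat]'hiA)).Perm arr :=
          (swap_perm a i.toNat M.toNat hiA hMlt).trans hperm
        have hpre' : ((a.set i.toNat (a[M.toNat]'hMlt)).set M.toNat (a[i.toNat]'hiA)).take (i + 1).toNat
            = T.take (i + 1).toNat := by
          have h1 : (i + 1).toNat = i.toNat + 1 := by omega
          have htk : ((a.set i.toNat (a[M.toNat]'hMlt)).set M.toNat (a[i.toNat]'hiA)).take i.toNat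
              = a.take i.toNat := by
            rw [take_set_of_le _ _ _ _ (by omega), take_set_of_le _ _ _ _ (by omega)]
          have hgi : ((a.set i.toNat (a[M.toNat]'hMlt)).set M.toNat (a[i.toNat]'hiA))[i.toNat]'(by simp; omega)
              = T[i.toNat]'(by omega) := by
            rw [List.getElem_set_ne (by omega), List.getElem_set_self]
            rw [← hrval]
            congr 1
          rw [h1, List.take_add_one, List.take_add_one,
            List.getElem?_eq_getElem (by simp; omega),
            List.getElem?_eq_getElem (l := T) (by omega), htk, hpre, hgi]
        rw [hstepA, hstepB, ha',
          ih (i + 1) (by omega) (by omega) _ _ (s + 1) hlen' hperm' hpre']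
        simp only [Prod.mk.injEq]
        refine ⟨trivial, ?_, trivial⟩
        have hk1 : ((arr.length : Int) - i).toNat = ((arr.length : Int) - (i + 1)).toNat + 1 := by omega
        rw [hk1]
        simp only [Nat.add_sub_cancel]
        rw [tri_succ]
        push_cast
        ring

-- ===== VERDICT (by name: the statement is the Claim_ definition above) =====
theorem selection_sort_with_comparison_count_spec : Claim_equal_selection_sort_with_comparison_count := by
  intro arr _
  unfold Spec_selection_sort_with_comparison_count
  show selection_sort_with_comparison_count arr = selection_sort_with_comparison_count_alt arr
  have aA : selection_sort_with_comparison_count arr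
      = (PySem.List.pyRange 0 (arr.length : Int) 1).foldl (pvStepA (arr.length : Int)) (arr, 0, 0) := rfl
  have aB : selection_sort_with_comparison_count_alt arr
      = (((PySem.List.pyRange 0 (arr.length : Int) 1).foldl (pvStepB (PySem.List.sorted arr id false)) (arr, 0)).1,
         PySem.Int.floordiv ((arr.length : Int) * ((arr.length : Int) - 1)) 2,
         ((PySem.List.pyRange 0 (arr.length : Int) 1).foldl (pvStepB (PySem.List.sorted arr id false)) (arr, 0)).2) := rfl
  rw [aA, aB,
    outer_loop arr ((arr.length : Int) - 0).toNat 0 rfl (by omega) arr 0 0 rfl (List.Perm.refl arr) (by simp),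
    floordiv_tri arr.length]
  have ht : ((arr.length : Int) - 0).toNat = arr.length := by omega
  rw [ht]
  simp
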